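-- pv_equiv track=rewrite | github.com/Andrey5375/DZ_2_Ozerov | dependency_visualizer.py | build_dependency_graph
-- ===== SOURCE A (Python) =====
-- from collections import defaultdict
--
-- def build_dependency_graph(package_name, packages_info):
--     """
--     Build the dependency graph for the given package.
--
--     Args:
--         package_name (str): The name of the package to analyze.
--         packages_info (dict): A dictionary mapping package names to their dependencies.
--
--     Returns:
--         dict: A dictionary representing the dependency graph.
--
--     Raises:
--         Exception: If the package is not found in the packages_info.
--     """
--     if package_name not in packages_info:
--         raise Exception(f"Package {package_name} not found in repository.")
--
--     graph = defaultdict(set)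
--     visited = set()
--
--     def dfs(pkg):
--         if pkg in visited:
--             return
--         visited.add(pkg)
--         graph[pkg]  # Ensure the package is added to the graph even if it has no dependencies
--         dependencies = packages_info.get(pkg, [])
--         for dep in dependencies:
--             graph[pkg].add(dep)
--             dfs(dep)
--
--     dfs(package_name)
--     return graph
-- ===== SOURCE B (Python) =====
-- from collections import defaultdict
--
-- def build_dependency_graph(package_name, packages_info):
--     if package_name not in packages_info:
--         raise Exception(f"Package {package_name} not found in repository.")
--
--     graph = defaultdict(set)
--     visited = set()
--     stack = [package_name]
--     while stack:
--         pkg = stack.pop()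
--         if pkg in visited:
--             continue
--         visited.add(pkg)
--         graph[pkg]  # ensure the package appears even with no dependencies
--         deps = packages_info.get(pkg, [])
--         for dep in deps:
--             graph[pkg].add(dep)
--         stack.extend(reversed(deps))
--     return graph
-- ===== Notes on version B (the rewrite author's own statement) =====
-- stated objective: alternative
-- what changed: The recursive DFS (nested dfs closure recursing per dependency) is replaced by an iterative worklist DFS with an explicit stack, pushing each node's dependencies reversed so the discovery order (and hence dict key order) is identical; no Python recursion-depth limit applies.
import Mathlib
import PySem

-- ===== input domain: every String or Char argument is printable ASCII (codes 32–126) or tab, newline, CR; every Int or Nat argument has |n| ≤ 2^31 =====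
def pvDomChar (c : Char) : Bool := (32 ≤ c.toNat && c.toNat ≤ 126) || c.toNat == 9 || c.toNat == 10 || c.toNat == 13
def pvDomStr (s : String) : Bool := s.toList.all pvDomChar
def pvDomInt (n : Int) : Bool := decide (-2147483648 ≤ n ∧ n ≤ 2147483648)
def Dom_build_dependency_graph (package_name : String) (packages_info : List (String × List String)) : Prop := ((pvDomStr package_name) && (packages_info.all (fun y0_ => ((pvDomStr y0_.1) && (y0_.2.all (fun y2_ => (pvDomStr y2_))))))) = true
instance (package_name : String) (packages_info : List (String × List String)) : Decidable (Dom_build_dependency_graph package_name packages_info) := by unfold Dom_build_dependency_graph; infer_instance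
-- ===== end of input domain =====

-- B replaces A's recursive DFS by an iterative explicit-stack DFS (dependencies pushed
-- in reverse, so the discovery order and hence the dict's key order are identical).

-- state of the traversal: (visited, graph) — shared shape of both ports
abbrev PvSt := PySem.Set String × PySem.Dict String (PySem.Set String)

-- packages_info.get(pkg, []) under the association-list dict convention (first match)
def pvDepsOf (pinfo : List (String × List String)) (pkg : String) : List String :=
  (List.lookup pkg pinfo).getD []

-- graph[pkg].add(dep)  (defaultdict(set): creates the entry if absent)
def pvAddE (pkg dep : String) (s : PvSt) : PvSt :=
  (s.1, PySem.Dict.modify s.2 pkg PySem.Set.empty (fun t => PySem.Set.add t dep))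

-- every reachable node is a key or a listed dependency; fuel bound for both ports
def pvFuel (pinfo : List (String × List String)) : Nat :=
  (pinfo.map Prod.fst ++ pinfo.flatMap Prod.snd).length + 1

-- ===== PORT A =====
-- the inner recursive dfs; fuel is only a totality guard (never exhausted when the
-- start node satisfies Pre_, see the proofs below)
def pvDfsA (pinfo : List (String × List String)) : Nat → String → PvSt → PvSt
  | 0, _, st => st
  | f + 1, pkg, st =>
    if PySem.Set.contains st.1 pkg then st
    else
      (pvDepsOf pinfo pkg).foldl
        (fun s dep => pvDfsA pinfo f dep (pvAddE pkg dep s))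
        (PySem.Set.add st.1 pkg, PySem.Dict.setdefault st.2 pkg PySem.Set.empty)

def build_dependency_graph (package_name : String) (packages_info : List (String × List String)) : List (String × List String) :=
  if (packages_info.map Prod.fst).contains package_name then
    (pvDfsA packages_info (pvFuel packages_info) package_name (PySem.Set.empty, PySem.Dict.empty)).2.items
  else []  -- Python raises Exception here; excluded by Pre_

-- ===== PORT B =====
-- iterative DFS with an explicit stack (list head = top of stack); pop, skip if
-- visited, else visit, touch graph[pkg], add all edges, push the dependencies
def pvLoopB (pinfo : List (String × List String)) (f : Nat) (stack : List String) (st : PvSt) : PvSt :=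
  match stack with
  | [] => st
  | pkg :: rest =>
    if PySem.Set.contains st.1 pkg then pvLoopB pinfo f rest st
    else
      match f with
      | 0 => st  -- fuel guard, never reached from the entry point
      | f' + 1 =>
        pvLoopB pinfo f' (pvDepsOf pinfo pkg ++ rest)
          (PySem.Set.add st.1 pkg,
           (pvDepsOf pinfo pkg).foldl
             (fun g dep => PySem.Dict.modify g pkg PySem.Set.empty (fun t => PySem.Set.add t dep))
             (PySem.Dict.setdefault st.2 pkg PySem.Set.empty))
  termination_by (f, stack.length)

def build_dependency_graph_alt (package_name : String) (packages_info : List (String × List String)) : List (String × List String) :=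
  if (packages_info.map Prod.fst).contains package_name then
    (pvLoopB packages_info (pvFuel packages_info) [package_name] (PySem.Set.empty, PySem.Dict.empty)).2.items
  else []  -- Python raises Exception here; excluded by Pre_

-- ===== PRECONDITION & SPEC =====
-- A raises Exception («Package … not found») iff package_name is not a key of packages_info
def Pre_build_dependency_graph (package_name : String) (packages_info : List (String × List String)) : Prop :=
  package_name ∈ packages_info.map Prod.fst
instance (package_name : String) (packages_info : List (String × List String)) : Decidable (Pre_build_dependency_graph package_name packages_info) := by unfold Pre_build_dependency_graph; infer_instance

def pvWitness_build_dependency_graph : String × (List (String × List String)) := ("a", [("a", ["b"]), ("b", [])])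

def Spec_build_dependency_graph (package_name : String) (packages_info : List (String × List String)) (out : List (String × List String)) : Prop := out = build_dependency_graph_alt package_name packages_info
instance (package_name : String) (packages_info : List (String × List String)) (out : List (String × List String)) : Decidable (Spec_build_dependency_graph package_name packages_info out) := by unfold Spec_build_dependency_graph; infer_instance

-- ===== CLAIM (what is proved, stated in full; the proofs are below) =====
def Claim_equal_build_dependency_graph : Prop := ∀ (package_name : String) (packages_info : List (String × List String)), Dom_build_dependency_graph package_name packages_info → Pre_build_dependency_graph package_name packages_info → Spec_build_dependency_graph package_name packages_info (build_dependency_graph package_name packages_info)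

-- ===== LEMMAS AND PROOFS =====

-- all nodes the traversal can ever reach from a key of packages_info
def pvUniv (pinfo : List (String × List String)) : List String :=
  pinfo.map Prod.fst ++ pinfo.flatMap Prod.snd

-- number of not-yet-visited universe nodes: the fuel/termination potential
def pvKv (pinfo : List (String × List String)) (vis : PySem.Set String) : Nat :=
  ((PySem.Set.ofList (pvUniv pinfo)).filter (fun u => !PySem.Set.contains vis u)).length

-- processing a list of start nodes in order with A's dfs
def pvDfsL (pinfo : List (String × List String)) (f : Nat) (l : List String) (st : PvSt) : PvSt :=
  l.foldl (fun s q => pvDfsA pinfo f q s) st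

lemma pvFoldlPreserve {α σ : Type} (P : σ → Prop) (g : σ → α → σ)
    (h : ∀ s a, P s → P (g s a)) : ∀ (l : List α) (s : σ), P s → P (l.foldl g s) := by
  intro l
  induction l with
  | nil => intro s hs; exact hs
  | cons a t ih => intro s hs; exact ih _ (h s a hs)

lemma pvSetContainsAdd (s : PySem.Set String) (x y : String) :
    PySem.Set.contains (PySem.Set.add s x) y = (PySem.Set.contains s y || (y == x)) := by
  rw [PySem.Set.add]
  split_ifs with h
  · by_cases hyx : y = x
    · subst hyx
      have hy : y ∈ s := by simpa [PySem.Set.contains] using h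
      simp [PySem.Set.contains, hy]
    · simp [PySem.Set.contains, hyx]
  · by_cases hyx : y = x
    · subst hyx
      simp [PySem.Set.contains]
    · simp [PySem.Set.contains, hyx]

lemma pvDepsSub (pinfo : List (String × List String)) (pkg x : String)
    (hx : x ∈ pvDepsOf pinfo pkg) : x ∈ pvUniv pinfo := by
  unfold pvDepsOf at hx
  unfold pvUniv
  induction pinfo with
  | nil => simp [List.lookup] at hx
  | cons p t ih =>
    obtain ⟨k, l⟩ := p
    rw [List.lookup] at hx
    by_cases hk : (pkg == k) = true
    · simp [hk] at hx
      apply List.mem_append_right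
      simp
      exact Or.inl hx
    · simp [hk] at hx
      have := ih hx
      simp [List.mem_append] at this ⊢
      tauto

-- ---- dict commutation at distinct keys (the visited key pkg is already present) ----

lemma pvContainsSetdefault (d : PySem.Dict String (PySem.Set String)) (k k' : String) (v : PySem.Set String) :
    (d.setdefault k v).contains k' = ((k' == k) || d.contains k') := by
  by_cases hc : d.contains k = true
  · rw [PySem.Dict.setdefault_of_contains _ _ hc]
    by_cases hk : k' = k
    · subst hk; simp [hc]
    · simp [hk]
  · rw [PySem.Dict.setdefault_of_not_contains _ _ (by simpa using hc)]
    rw [PySem.Dict.contains_insert]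

lemma pvInsertComm (d : PySem.Dict String (PySem.Set String)) (pkg k : String)
    (v w : PySem.Set String) (hp : d.contains pkg = true) (hne : k ≠ pkg) :
    (d.insert k v).insert pkg w = (d.insert pkg w).insert k v := by
  by_cases hk : d.contains k = true
  · apply PySem.Dict.ext
    have h1 : (d.insert k v).contains pkg = true := by
      rw [PySem.Dict.contains_insert]; simp [hp]
    have h2 : (d.insert pkg w).contains k = true := by
      rw [PySem.Dict.contains_insert]; simp [hk]
    rw [PySem.Dict.items_insert_of_contains _ _ h1,
        PySem.Dict.items_insert_of_contains _ _ hk,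
        PySem.Dict.items_insert_of_contains _ _ h2,
        PySem.Dict.items_insert_of_contains _ _ hp]
    rw [List.map_map, List.map_map]
    apply List.map_congr_left
    intro p _
    by_cases hpk : p.1 = k
    · simp [Function.comp, hpk, hne]
    · by_cases hpp : p.1 = pkg
      · simp [Function.comp, hpp, Ne.symm hne]
      · simp [Function.comp, hpk, hpp]
  · apply PySem.Dict.ext
    have h1 : (d.insert k v).contains pkg = true := by
      rw [PySem.Dict.contains_insert]; simp [hp]
    have h2 : (d.insert pkg w).contains k = false := by
      rw [PySem.Dict.contains_insert]; simp [hne, hk]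
    rw [PySem.Dict.items_insert_of_contains _ _ h1,
        PySem.Dict.items_insert_of_not_contains _ _ (by simpa using hk),
        PySem.Dict.items_insert_of_not_contains _ _ h2,
        PySem.Dict.items_insert_of_contains _ _ hp]
    rw [List.map_append]
    congr 1
    simp [hne]

lemma pvModifyComm (d : PySem.Dict String (PySem.Set String)) (pkg k : String)
    (d0 d1 : PySem.Set String) (f g : PySem.Set String → PySem.Set String)
    (hp : d.contains pkg = true) (hne : k ≠ pkg) :
    (d.modify k d0 g).modify pkg d1 f = (d.modify pkg d1 f).modify k d0 g := by
  unfold PySem.Dict.modify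
  rw [PySem.Dict.getD_insert_of_ne _ _ _ (Ne.symm hne),
      PySem.Dict.getD_insert_of_ne _ _ _ hne]
  exact pvInsertComm d pkg k _ _ hp hne

lemma pvModifySetdefaultComm (d : PySem.Dict String (PySem.Set String)) (pkg k : String)
    (v d1 : PySem.Set String) (f : PySem.Set String → PySem.Set String)
    (hp : d.contains pkg = true) (hne : k ≠ pkg) :
    (d.setdefault k v).modify pkg d1 f = (d.modify pkg d1 f).setdefault k v := by
  by_cases hk : d.contains k = true
  · rw [PySem.Dict.setdefault_of_contains _ _ hk]
    have : (d.modify pkg d1 f).contains k = true := by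
      unfold PySem.Dict.modify
      rw [PySem.Dict.contains_insert]; simp [hk]
    rw [PySem.Dict.setdefault_of_contains _ _ this]
  · rw [PySem.Dict.setdefault_of_not_contains _ _ (by simpa using hk)]
    have : (d.modify pkg d1 f).contains k = false := by
      unfold PySem.Dict.modify
      rw [PySem.Dict.contains_insert]; simp [hne, hk]
    rw [PySem.Dict.setdefault_of_not_contains _ _ this]
    unfold PySem.Dict.modify
    rw [PySem.Dict.getD_insert_of_ne _ _ _ (Ne.symm hne)]
    exact pvInsertComm d pkg k _ _ hp hne

-- ---- monotonicity of the traversal state ----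

lemma pvDfsA_vis_mono (pinfo : List (String × List String)) :
    ∀ (f : Nat) (pkg : String) (st : PvSt) (x : String),
      PySem.Set.contains st.1 x = true → PySem.Set.contains (pvDfsA pinfo f pkg st).1 x = true := by
  intro f
  induction f with
  | zero => intro pkg st x hx; simpa [pvDfsA] using hx
  | succ f ih =>
    intro pkg st x hx
    rw [pvDfsA]
    split_ifs with h
    · exact hx
    · apply pvFoldlPreserve (P := fun s : PvSt => PySem.Set.contains s.1 x = true)
      · intro s a hs
        exact ih a _ x (by simpa [pvAddE] using hs)
      · show PySem.Set.contains (PySem.Set.add st.1 pkg) x = true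
        rw [pvSetContainsAdd, hx]
        simp

lemma pvDfsA_dict_mono (pinfo : List (String × List String)) :
    ∀ (f : Nat) (pkg : String) (st : PvSt) (x : String),
      st.2.contains x = true → (pvDfsA pinfo f pkg st).2.contains x = true := by
  intro f
  induction f with
  | zero => intro pkg st x hx; simpa [pvDfsA] using hx
  | succ f ih =>
    intro pkg st x hx
    rw [pvDfsA]
    split_ifs with h
    · exact hx
    · apply pvFoldlPreserve (P := fun s : PvSt => s.2.contains x = true)
      · intro s a hs
        apply ih a _ x
        show (PySem.Dict.modify s.2 pkg PySem.Set.empty _).contains x = true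
        unfold PySem.Dict.modify
        rw [PySem.Dict.contains_insert]; simp [hs]
      · show (PySem.Dict.setdefault st.2 pkg PySem.Set.empty).contains x = true
        rw [pvContainsSetdefault]; simp [hx]

-- ---- the edge-add on the visited key pkg commutes with any deeper dfs ----

lemma pvAddE_dfsA_comm (pinfo : List (String × List String)) :
    ∀ (f : Nat) (d pkg e : String) (s : PvSt),
      PySem.Set.contains s.1 pkg = true → s.2.contains pkg = true →
      pvAddE pkg e (pvDfsA pinfo f d s) = pvDfsA pinfo f d (pvAddE pkg e s) := by
  intro f
  induction f with
  | zero => intro d pkg e s _ _; simp [pvDfsA]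
  | succ f ih =>
    intro d pkg e s hv hg
    rw [pvDfsA, pvDfsA]
    have hvis : PySem.Set.contains (pvAddE pkg e s).1 d = PySem.Set.contains s.1 d := rfl
    rw [hvis]
    split_ifs with h
    · rfl
    · have hne : d ≠ pkg := by intro hdp; rw [hdp] at h; exact h hv
      -- the two initial states agree
      have hinit : (PySem.Set.add (pvAddE pkg e s).1 d,
                    PySem.Dict.setdefault (pvAddE pkg e s).2 d PySem.Set.empty)
          = pvAddE pkg e (PySem.Set.add s.1 d, PySem.Dict.setdefault s.2 d PySem.Set.empty) := by
        simp only [pvAddE]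
        rw [pvModifySetdefaultComm s.2 pkg d PySem.Set.empty PySem.Set.empty _ hg hne]
      rw [hinit]
      -- commute pvAddE pkg e through the fold
      have key : ∀ (l : List String) (s' : PvSt),
          PySem.Set.contains s'.1 pkg = true → s'.2.contains pkg = true →
          PySem.Set.contains s'.1 d = true → s'.2.contains d = true →
          l.foldl (fun s'' dep => pvDfsA pinfo f dep (pvAddE d dep s'')) (pvAddE pkg e s')
          = pvAddE pkg e (l.foldl (fun s'' dep => pvDfsA pinfo f dep (pvAddE d dep s'')) s') := by
        intro l
        induction l with
        | nil => intro s' _ _ _ _; rfl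
        | cons q qs ihq =>
          intro s' h1 h2 h3 h4
          simp only [List.foldl_cons]
          have step1 : pvDfsA pinfo f q (pvAddE d q (pvAddE pkg e s'))
              = pvAddE pkg e (pvDfsA pinfo f q (pvAddE d q s')) := by
            have hcomm : pvAddE d q (pvAddE pkg e s') = pvAddE pkg e (pvAddE d q s') := by
              simp only [pvAddE]
              rw [pvModifyComm s'.2 pkg d PySem.Set.empty PySem.Set.empty _ _ h2 hne]
            rw [hcomm]
            exact (ih q pkg e (pvAddE d q s') h1 (by
              show (PySem.Dict.modify s'.2 d PySem.Set.empty _).contains pkg = true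
              unfold PySem.Dict.modify
              rw [PySem.Dict.contains_insert]; simp [h2])).symm
          rw [step1]
          apply ihq
          · exact pvDfsA_vis_mono pinfo f q _ pkg (by simpa [pvAddE] using h1)
          · apply pvDfsA_dict_mono pinfo f q _ pkg
            show (PySem.Dict.modify s'.2 d PySem.Set.empty _).contains pkg = true
            unfold PySem.Dict.modify
            rw [PySem.Dict.contains_insert]; simp [h2]
          · exact pvDfsA_vis_mono pinfo f q _ d (by simpa [pvAddE] using h3)
          · apply pvDfsA_dict_mono pinfo f q _ d
            show (PySem.Dict.modify s'.2 d PySem.Set.empty _).contains d = true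
            unfold PySem.Dict.modify
            rw [PySem.Dict.contains_insert]; simp
      rw [key]
      · rw [pvSetContainsAdd, hv]; simp
      · rw [pvContainsSetdefault, hg]; simp
      · rw [pvSetContainsAdd]; simp
      · rw [pvContainsSetdefault]; simp

-- ---- A's interleaved (add edge; recurse) fold = add all edges first, then dfs each dep ----

lemma pvAddEfold_dfsA_comm (pinfo : List (String × List String)) (f : Nat) (pkg : String) :
    ∀ (ds : List String) (d : String) (s : PvSt),
      PySem.Set.contains s.1 pkg = true → s.2.contains pkg = true →
      ds.foldl (fun s' q => pvAddE pkg q s') (pvDfsA pinfo f d s)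
      = pvDfsA pinfo f d (ds.foldl (fun s' q => pvAddE pkg q s') s) := by
  intro ds
  induction ds with
  | nil => intro d s _ _; rfl
  | cons q qs ihq =>
    intro d s h1 h2
    simp only [List.foldl_cons]
    rw [pvAddE_dfsA_comm pinfo f d pkg q s h1 h2]
    apply ihq
    · exact h1
    · show (PySem.Dict.modify s.2 pkg PySem.Set.empty _).contains pkg = true
      unfold PySem.Dict.modify
      rw [PySem.Dict.contains_insert]; simp

lemma pvDfsA_fold_split (pinfo : List (String × List String)) (f : Nat) (pkg : String) :
    ∀ (deps : List String) (s : PvSt),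
      PySem.Set.contains s.1 pkg = true → s.2.contains pkg = true →
      deps.foldl (fun s' dep => pvDfsA pinfo f dep (pvAddE pkg dep s')) s
      = pvDfsL pinfo f deps (deps.foldl (fun s' dep => pvAddE pkg dep s') s) := by
  intro deps
  induction deps with
  | nil => intro s _ _; rfl
  | cons d ds ihd =>
    intro s h1 h2
    simp only [List.foldl_cons, pvDfsL]
    have h1' : PySem.Set.contains (pvAddE pkg d s).1 pkg = true := h1
    have h2' : (pvAddE pkg d s).2.contains pkg = true := by
      show (PySem.Dict.modify s.2 pkg PySem.Set.empty _).contains pkg = true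
      unfold PySem.Dict.modify
      rw [PySem.Dict.contains_insert]; simp
    have ih := ihd (pvDfsA pinfo f d (pvAddE pkg d s))
      (pvDfsA_vis_mono pinfo f d _ pkg h1') (pvDfsA_dict_mono pinfo f d _ pkg h2')
    rw [ih]
    unfold pvDfsL
    congr 1
    exact pvAddEfold_dfsA_comm pinfo f pkg ds d (pvAddE pkg d s) h1' h2'

-- ---- potential lemmas ----

lemma pvKv_add (pinfo : List (String × List String)) (vis : PySem.Set String) (pkg : String)
    (hu : pkg ∈ pvUniv pinfo) (hnv : PySem.Set.contains vis pkg = false) :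
    pvKv pinfo (PySem.Set.add vis pkg) + 1 = pvKv pinfo vis := by
  unfold pvKv
  have hmem : pkg ∈ PySem.Set.ofList (pvUniv pinfo) := by
    rw [PySem.Set.mem_ofList]; exact hu
  have hnd : (PySem.Set.ofList (pvUniv pinfo)).Nodup := PySem.Set.nodup_ofList _
  have h1 : (PySem.Set.ofList (pvUniv pinfo)).filter
      (fun u => !PySem.Set.contains (PySem.Set.add vis pkg) u)
      = ((PySem.Set.ofList (pvUniv pinfo)).filter (fun u => !PySem.Set.contains vis u)).filter
          (fun u => u != pkg) := by
    rw [List.filter_filter]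
    apply List.filter_congr
    intro u _
    rw [pvSetContainsAdd]
    by_cases hup : u = pkg
    · subst hup; simp
    · have hb : (u == pkg) = false := by simp [hup]
      rw [hb]
      simp [bne, hb]
  rw [h1]
  have hnv' : pkg ∉ vis := by simpa [PySem.Set.contains] using hnv
  have h2 : pkg ∈ (PySem.Set.ofList (pvUniv pinfo)).filter (fun u => !PySem.Set.contains vis u) := by
    rw [List.mem_filter]
    exact ⟨hmem, by simp [PySem.Set.contains, hnv']⟩
  rw [← List.Nodup.erase_eq_filter (hnd.filter _) pkg, List.length_erase_of_mem h2]
  have h3 : 0 < ((PySem.Set.ofList (pvUniv pinfo)).filter (fun u => !PySem.Set.contains vis u)).length :=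
    List.length_pos_of_mem h2
  omega

lemma pvKv_mono (pinfo : List (String × List String)) (v1 v2 : PySem.Set String)
    (h : ∀ x, PySem.Set.contains v1 x = true → PySem.Set.contains v2 x = true) :
    pvKv pinfo v2 ≤ pvKv pinfo v1 := by
  unfold pvKv
  rw [← List.countP_eq_length_filter, ← List.countP_eq_length_filter]
  apply List.countP_mono_left
  intro x _ hx
  have h2 : PySem.Set.contains v2 x = false := by
    cases hv2 : PySem.Set.contains v2 x
    · rfl
    · rw [hv2] at hx; simp at hx
  have h1 : PySem.Set.contains v1 x = false := by
    cases hv1 : PySem.Set.contains v1 x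
    · rfl
    · rw [h x hv1] at h2; cases h2
  rw [h1]
  rfl

lemma pvDfsL_vis_mono (pinfo : List (String × List String)) (f : Nat) (l : List String)
    (st : PvSt) (x : String) (hx : PySem.Set.contains st.1 x = true) :
    PySem.Set.contains (pvDfsL pinfo f l st).1 x = true := by
  unfold pvDfsL
  apply pvFoldlPreserve (P := fun s : PvSt => PySem.Set.contains s.1 x = true)
  · intro s a hs; exact pvDfsA_vis_mono pinfo f a s x hs
  · exact hx

lemma pvOfListLenAux : ∀ (l : List String) (s : PySem.Set String),
    (l.foldl PySem.Set.add s).length ≤ s.length + l.length := by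
  intro l
  induction l with
  | nil => intro s; simp
  | cons a t ih =>
    intro s
    have h1 : (PySem.Set.add s a).length ≤ s.length + 1 := by
      rw [PySem.Set.add]
      split_ifs
      · omega
      · simp
    calc ((a :: t).foldl PySem.Set.add s).length
        = (t.foldl PySem.Set.add (PySem.Set.add s a)).length := rfl
      _ ≤ (PySem.Set.add s a).length + t.length := ih _
      _ ≤ s.length + (a :: t).length := by simp; omega

lemma pvKv_le (pinfo : List (String × List String)) (vis : PySem.Set String) :
    pvKv pinfo vis ≤ (pvUniv pinfo).length := by
  unfold pvKv
  calc ((PySem.Set.ofList (pvUniv pinfo)).filter _).length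
      ≤ (PySem.Set.ofList (pvUniv pinfo)).length := List.length_filter_le _ _
    _ ≤ (pvUniv pinfo).length := by
        have := pvOfListLenAux (pvUniv pinfo) []
        simpa [PySem.Set.ofList_eq_foldl] using this

-- fold of edge-adds only touches the graph component
lemma pvAddEfold_pair (pkg : String) (ds : List String) :
    ∀ (v : PySem.Set String) (g : PySem.Dict String (PySem.Set String)),
      ds.foldl (fun s q => pvAddE pkg q s) ((v, g) : PvSt)
      = (v, ds.foldl (fun g' q => PySem.Dict.modify g' pkg PySem.Set.empty (fun t => PySem.Set.add t q)) g) := by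
  induction ds with
  | nil => intro v g; rfl
  | cons q qs ih => intro v g; simp only [List.foldl_cons]; exact ih v _

-- ---- the main bridge: the explicit-stack loop computes the same state as A's dfs run over the stack ----

lemma pvM (pinfo : List (String × List String)) :
    ∀ (n f1 f2 : Nat) (stack : List String) (st : PvSt),
      pvKv pinfo st.1 < n → (∀ x ∈ stack, x ∈ pvUniv pinfo) →
      pvKv pinfo st.1 < f1 → pvKv pinfo st.1 < f2 →
      pvLoopB pinfo f2 stack st = pvDfsL pinfo f1 stack st := by
  intro n
  induction n with
  | zero => intro f1 f2 stack st h _ _ _; omega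
  | succ n ihn =>
    intro f1 f2 stack st hn hsub hf1 hf2
    induction stack with
    | nil => rw [pvLoopB]; rfl
    | cons pkg rest ihstack =>
      obtain ⟨g1, rfl⟩ : ∃ g1, f1 = g1 + 1 := ⟨f1 - 1, by omega⟩
      obtain ⟨g2, rfl⟩ : ∃ g2, f2 = g2 + 1 := ⟨f2 - 1, by omega⟩
      by_cases hv : PySem.Set.contains st.1 pkg = true
      · -- already visited: both sides skip pkg
        rw [pvLoopB, if_pos hv]
        have hA : pvDfsA pinfo (g1 + 1) pkg st = st := by
          rw [pvDfsA, if_pos hv]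
        have : pvDfsL pinfo (g1 + 1) (pkg :: rest) st = pvDfsL pinfo (g1 + 1) rest st := by
          unfold pvDfsL; simp only [List.foldl_cons, hA]
        rw [this]
        exact ihstack (fun x hx => hsub x (List.mem_cons_of_mem _ hx))
      · -- new node
        have hpkgU : pkg ∈ pvUniv pinfo := hsub pkg List.mem_cons_self
        set deps := pvDepsOf pinfo pkg with hdeps
        set st1 : PvSt := (PySem.Set.add st.1 pkg, PySem.Dict.setdefault st.2 pkg PySem.Set.empty) with hst1
        set st2 : PvSt := deps.foldl (fun s q => pvAddE pkg q s) st1 with hst2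
        have hst2' : st2 = (PySem.Set.add st.1 pkg,
            deps.foldl (fun g dep => PySem.Dict.modify g pkg PySem.Set.empty (fun t => PySem.Set.add t dep))
              (PySem.Dict.setdefault st.2 pkg PySem.Set.empty)) := by
          rw [hst2, hst1]; exact pvAddEfold_pair pkg deps _ _
        have hKdrop : pvKv pinfo st2.1 + 1 = pvKv pinfo st.1 := by
          rw [hst2']; exact pvKv_add pinfo st.1 pkg hpkgU (by simpa using hv)
        -- B side
        have hB : pvLoopB pinfo (g2 + 1) (pkg :: rest) st = pvLoopB pinfo g2 (deps ++ rest) st2 := by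
          rw [hst2']
          rw [pvLoopB, if_neg hv]
        -- A side
        have hvst1 : PySem.Set.contains st1.1 pkg = true := by
          rw [hst1]; show PySem.Set.contains (PySem.Set.add st.1 pkg) pkg = true
          rw [pvSetContainsAdd]; simp
        have hgst1 : st1.2.contains pkg = true := by
          rw [hst1]; show (PySem.Dict.setdefault st.2 pkg PySem.Set.empty).contains pkg = true
          rw [pvContainsSetdefault]; simp
        have hA : pvDfsA pinfo (g1 + 1) pkg st = pvDfsL pinfo g1 deps st2 := by
          rw [pvDfsA, if_neg hv]
          rw [← hdeps, ← hst1]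
          rw [pvDfsA_fold_split pinfo g1 pkg deps st1 hvst1 hgst1]
        have hsub' : ∀ x ∈ deps ++ rest, x ∈ pvUniv pinfo := by
          intro x hx
          rcases List.mem_append.mp hx with h | h
          · exact pvDepsSub pinfo pkg x h
          · exact hsub x (List.mem_cons_of_mem _ h)
        have hIH1 : pvLoopB pinfo g2 (deps ++ rest) st2 = pvDfsL pinfo g1 (deps ++ rest) st2 := by
          apply ihn g1 g2 (deps ++ rest) st2 (by omega) hsub' (by omega) (by omega)
        have hXsplit : pvDfsL pinfo g1 (deps ++ rest) st2
            = pvDfsL pinfo g1 rest (pvDfsL pinfo g1 deps st2) := by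
          unfold pvDfsL; rw [List.foldl_append]
        have hXK : pvKv pinfo (pvDfsL pinfo g1 deps st2).1 ≤ pvKv pinfo st2.1 := by
          apply pvKv_mono
          intro x hx
          exact pvDfsL_vis_mono pinfo g1 deps st2 x hx
        have hrest : ∀ x ∈ rest, x ∈ pvUniv pinfo := fun x hx => hsub x (List.mem_cons_of_mem _ hx)
        have hbr1 : pvDfsL pinfo (g1 + 1) rest (pvDfsL pinfo g1 deps st2)
            = pvLoopB pinfo (pvKv pinfo (pvDfsL pinfo g1 deps st2).1 + 1) rest (pvDfsL pinfo g1 deps st2) :=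
          (ihn (g1 + 1) _ rest _ (by omega) hrest (by omega) (by omega)).symm
        have hbr2 : pvDfsL pinfo g1 rest (pvDfsL pinfo g1 deps st2)
            = pvLoopB pinfo (pvKv pinfo (pvDfsL pinfo g1 deps st2).1 + 1) rest (pvDfsL pinfo g1 deps st2) :=
          (ihn g1 _ rest _ (by omega) hrest (by omega) (by omega)).symm
        calc pvLoopB pinfo (g2 + 1) (pkg :: rest) st
            = pvLoopB pinfo g2 (deps ++ rest) st2 := hB
          _ = pvDfsL pinfo g1 (deps ++ rest) st2 := hIH1
          _ = pvDfsL pinfo g1 rest (pvDfsL pinfo g1 deps st2) := hXsplit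
          _ = pvLoopB pinfo (pvKv pinfo (pvDfsL pinfo g1 deps st2).1 + 1) rest (pvDfsL pinfo g1 deps st2) := hbr2
          _ = pvDfsL pinfo (g1 + 1) rest (pvDfsL pinfo g1 deps st2) := hbr1.symm
          _ = pvDfsL pinfo (g1 + 1) (pkg :: rest) st := by
              unfold pvDfsL
              simp only [List.foldl_cons]
              congr 1
              exact hA.symm

-- ===== VERDICT (by name: the statement is the Claim_ definition above) =====
theorem build_dependency_graph_spec : Claim_equal_build_dependency_graph := by
  intro pn pinfo _ hpre
  unfold Spec_build_dependency_graph
  unfold build_dependency_graph build_dependency_graph_alt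
  have hpre' : pn ∈ pinfo.map Prod.fst := hpre
  have hguard : (pinfo.map Prod.fst).contains pn = true := List.contains_iff_mem.mpr hpre'
  rw [if_pos hguard, if_pos hguard]
  have hle := pvKv_le pinfo PySem.Set.empty
  have hF : pvKv pinfo PySem.Set.empty < pvFuel pinfo := by
    unfold pvFuel
    unfold pvUniv at hle
    omega
  have hM := pvM pinfo (pvKv pinfo PySem.Set.empty + 1) (pvFuel pinfo) (pvFuel pinfo) [pn]
    (PySem.Set.empty, PySem.Dict.empty)
    (by show pvKv pinfo PySem.Set.empty < pvKv pinfo PySem.Set.empty + 1; omega)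
    (by
      intro x hx
      simp only [List.mem_singleton] at hx
      subst hx
      exact List.mem_append_left _ hpre')
    (by show pvKv pinfo PySem.Set.empty < pvFuel pinfo; exact hF)
    (by show pvKv pinfo PySem.Set.empty < pvFuel pinfo; exact hF)
  rw [hM]
  rfl
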